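-- pv_equiv track=rewrite | github.com/NeckofNickey/algorithms | graphs_and_trees/two_knights.py | min_meeting_moves
-- ===== SOURCE A (Python) =====
-- from collections import deque
--
-- def chess_to_coord(pos):
--     """Преобразует шахматную нотацию в координаты (0..7)"""
--     col = ord(pos[0]) - ord('a')
--     row = int(pos[1]) - 1
--     return row, col
--
-- def get_knight_moves(r, c):
--     """Возвращает все возможные ходы коня из позиции (r, c)"""
--     moves = []
--     for dr, dc in [(-2,-1),(-2,1),(-1,-2),(-1,2),
--                    (1,-2),(1,2),(2,-1),(2,1)]:
--         nr, nc = r + dr, c + dc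
--         if 0 <= nr < 8 and 0 <= nc < 8:
--             moves.append((nr, nc))
--     return moves
--
-- def min_meeting_moves(red_pos, green_pos):
--     # Преобразуем координаты
--     red_start = chess_to_coord(red_pos)
--     green_start = chess_to_coord(green_pos)
--
--     # Если уже на одной клетке
--     if red_start == green_start:
--         return 0
--
--     # BFS: (pos_red, pos_green, moves)
--     queue = deque([(red_start, green_start, 0)])
--     visited = set([red_start, green_start])
--
--     while queue:
--         pos_red, pos_green, moves = queue.popleft()
--
--         # Все возможные ходы для красного коня
--         for next_red in get_knight_moves(*pos_red):
--             # Все возможные ходы для зеленого коня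
--             for next_green in get_knight_moves(*pos_green):
--                 # Проверяем встречу
--                 if next_red == next_green:
--                     return moves + 1
--
--                 # Проверяем, не были ли в этом состоянии
--                 state = (next_red, next_green)
--                 if state not in visited:
--                     visited.add(state)
--                     queue.append((next_red, next_green, moves + 1))
--
--     return -1
-- ===== SOURCE B (Python) =====
-- def min_meeting_moves(red_pos, green_pos):
--     red = (int(red_pos[1]) - 1, ord(red_pos[0]) - ord('a'))
--     green = (int(green_pos[1]) - 1, ord(green_pos[0]) - ord('a'))
--     if red == green:
--         return 0
--     deltas = ((-2, -1), (-2, 1), (-1, -2), (-1, 2),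
--               (1, -2), (1, 2), (2, -1), (2, 1))
--
--     def step(cells):
--         return {(r + dr, c + dc) for (r, c) in cells for dr, dc in deltas
--                 if 0 <= r + dr < 8 and 0 <= c + dc < 8}
--
--     # cur = squares each knight reaches in exactly k moves; prev = exactly k-2 moves.
--     # The knights meet after k simultaneous moves iff the two exact-k sets intersect;
--     # if both exact-k sequences become 2-periodic with no intersection, they never meet.
--     cur, prev, k = ({red}, {green}), None, 0
--     while True:
--         nxt = (step(cur[0]), step(cur[1]))
--         k += 1
--         if nxt[0] & nxt[1]:
--             return k
--         if nxt == prev: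
--             return -1
--         prev, cur = cur, nxt
-- ===== Notes on version B (the rewrite author's own statement) =====
-- stated objective: faster
-- what changed: A runs a BFS over joint (red,green) knight-pair states (up to 64^2 states, with a pair-visited set and per-entry move counters); B never forms pair states at all: it expands two independent single-knight exactly-k reachability sets (<=64 cells each), returns k as soon as the two exact-k sets intersect, and returns -1 when both sequences become 2-periodic without intersecting (correct because a square is reachable by a length-k walk for each knight iff they can meet there after k simultaneous moves).
-- outside the precondition, e.g. on min_meeting_moves('a', 'b2'): A raises IndexError, B raises IndexError; on min_meeting_moves('ax', 'b2'): A raises ValueError, B raises ValueError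
import Mathlib
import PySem

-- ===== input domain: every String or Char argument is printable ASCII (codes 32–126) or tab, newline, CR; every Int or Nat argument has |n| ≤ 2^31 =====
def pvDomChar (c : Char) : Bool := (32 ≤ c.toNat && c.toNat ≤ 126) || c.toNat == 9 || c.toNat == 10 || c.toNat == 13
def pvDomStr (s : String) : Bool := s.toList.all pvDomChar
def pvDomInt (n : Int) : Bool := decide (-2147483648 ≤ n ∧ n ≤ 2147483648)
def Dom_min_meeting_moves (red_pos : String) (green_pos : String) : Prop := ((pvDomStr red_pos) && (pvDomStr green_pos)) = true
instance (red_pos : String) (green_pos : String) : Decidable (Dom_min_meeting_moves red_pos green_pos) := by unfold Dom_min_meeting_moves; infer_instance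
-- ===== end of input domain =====

-- B replaces A's BFS over joint (red,green) knight-pair states by two INDEPENDENT
-- single-knight frontier expansions: it tracks the set of squares each knight can
-- reach in exactly k moves, returns k when those two sets first intersect, and
-- returns -1 when both exact-k sequences become 2-periodic without intersecting
-- (objective: faster — 64-cell sets instead of up to 64^2 joint pair states).

-- ===== PORT A =====

-- element of A's heterogeneous Python set `visited` (it holds the two single
-- positions seeded by `set([red_start, green_start])` AND joint states)
inductive VElem
  | pos   : Int × Int → VElem
  | state : (Int × Int) × (Int × Int) → VElem
deriving DecidableEq, Repr

-- chess_to_coord: ord(pos[0]) - ord('a'), int(pos[1]) - 1; none = IndexError/ValueError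
def chess_to_coord (pos : String) : Option (Int × Int) :=
  match PySem.Str.pyGet? pos 0 with
  | none => none
  | some c0 =>
    let col : Int := (c0.toNat : Int) - 97
    match PySem.Str.pyGet? pos 1 with
    | none => none
    | some c1 =>
      match PySem.Int.ofChars? [c1] with
      | none => none
      | some n => some (n - 1, col)

def knightDeltas : List (Int × Int) :=
  [(-2,-1),(-2,1),(-1,-2),(-1,2),(1,-2),(1,2),(2,-1),(2,1)]

def get_knight_moves (r : Int) (c : Int) : List (Int × Int) :=
  knightDeltas.foldl (fun moves d =>
    if 0 ≤ r + d.1 ∧ r + d.1 < 8 ∧ 0 ≤ c + d.2 ∧ c + d.2 < 8 then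
      moves ++ [(r + d.1, c + d.2)]
    else moves) []

-- inner `for next_green in get_knight_moves(*pos_green)` loop
def innerA (nr : Int × Int) (moves : Int) :
    List (Int × Int) → List ((Int × Int) × (Int × Int) × Int) → PySem.Set VElem →
    Option Int × List ((Int × Int) × (Int × Int) × Int) × PySem.Set VElem
  | [], q, v => (none, q, v)
  | ng :: gs, q, v =>
    if nr = ng then (some (moves + 1), q, v)
    else if v.contains (VElem.state (nr, ng)) then innerA nr moves gs q v
    else innerA nr moves gs (q ++ [(nr, ng, moves + 1)]) (v.add (VElem.state (nr, ng)))

-- outer `for next_red in get_knight_moves(*pos_red)` loop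
def outerA (pg : Int × Int) (moves : Int) :
    List (Int × Int) → List ((Int × Int) × (Int × Int) × Int) → PySem.Set VElem →
    Option Int × List ((Int × Int) × (Int × Int) × Int) × PySem.Set VElem
  | [], q, v => (none, q, v)
  | nr :: rs, q, v =>
    match innerA nr moves (get_knight_moves pg.1 pg.2) q v with
    | (some a, q', v') => (some a, q', v')
    | (none, q', v') => outerA pg moves rs q' v'

-- `while queue:` — fuel only makes the recursion total; 5000 is proven sufficient below
def bfsA : Nat → List ((Int × Int) × (Int × Int) × Int) → PySem.Set VElem → Int
  | _, [], _ => -1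
  | 0, _ :: _, _ => -1
  | fuel + 1, (pr, pg, moves) :: rest, v =>
    match outerA pg moves (get_knight_moves pr.1 pr.2) rest v with
    | (some a, _, _) => a
    | (none, q', v') => bfsA fuel q' v'

def min_meeting_moves (red_pos : String) (green_pos : String) : Int :=
  match chess_to_coord red_pos, chess_to_coord green_pos with
  | some red_start, some green_start =>
    if red_start = green_start then 0
    else
      bfsA 5000 [(red_start, green_start, 0)]
        (PySem.Set.ofList [VElem.pos red_start, VElem.pos green_start])
  | _, _ => 0   -- Python raises here (IndexError/ValueError); excluded by Pre_

-- ===== PORT B =====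

-- B parses inline: (int(p[1]) - 1, ord(p[0]) - ord('a'))
def parseB (p : String) : Option (Int × Int) :=
  match PySem.Str.pyGet? p 1 with
  | none => none
  | some c1 =>
    match PySem.Int.ofChars? [c1] with
    | none => none
    | some n =>
      match PySem.Str.pyGet? p 0 with
      | none => none
      | some c0 => some (n - 1, (c0.toNat : Int) - 97)

def deltasB : List (Int × Int) :=
  [(-2,-1),(-2,1),(-1,-2),(-1,2),(1,-2),(1,2),(2,-1),(2,1)]

-- step(cells): set comprehension over the cells and the eight deltas
def stepB (cells : PySem.Set (Int × Int)) : PySem.Set (Int × Int) :=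
  cells.foldl (fun s rc =>
    deltasB.foldl (fun s d =>
      if 0 ≤ rc.1 + d.1 ∧ rc.1 + d.1 < 8 ∧ 0 ≤ rc.2 + d.2 ∧ rc.2 + d.2 < 8 then
        s.add (rc.1 + d.1, rc.2 + d.2)
      else s) s) PySem.Set.empty

-- `while True:` — fuel only makes the recursion total; 600 is proven sufficient below
def loopAlt : Nat → Int → PySem.Set (Int × Int) × PySem.Set (Int × Int) →
    Option (PySem.Set (Int × Int) × PySem.Set (Int × Int)) → Int
  | 0, _, _, _ => -1
  | fuel + 1, k, cur, prev =>
    let nxt := (stepB cur.1, stepB cur.2)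
    let k' := k + 1
    if PySem.Set.inter nxt.1 nxt.2 ≠ [] then k'   -- if nxt[0] & nxt[1]: return k
    else
      match prev with
      | some p =>
        -- if nxt == prev: return -1   (Python set equality is extensional)
        if PySem.Set.equal nxt.1 p.1 && PySem.Set.equal nxt.2 p.2 then -1
        else loopAlt fuel k' nxt (some cur)
      | none => loopAlt fuel k' nxt (some cur)

def min_meeting_moves_alt (red_pos : String) (green_pos : String) : Int :=
  match parseB red_pos with
  | none => 0   -- Python raises here; excluded by Pre_
  | some red =>
    match parseB green_pos with
    | none => 0   -- Python raises here; excluded by Pre_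
    | some green =>
      if red = green then 0
      else loopAlt 600 0 (PySem.Set.ofList [red], PySem.Set.ofList [green]) none

-- ===== PRECONDITION & SPEC =====

-- Pre_ excludes exactly the inputs where Python A raises: a position string shorter
-- than 2 characters (IndexError) or whose second character is not an ASCII digit
-- (ValueError in int()).
def Pre_min_meeting_moves (red_pos : String) (green_pos : String) : Prop :=
  (match red_pos.toList with | _ :: c :: _ => c.isDigit = true | _ => False) ∧
  (match green_pos.toList with | _ :: c :: _ => c.isDigit = true | _ => False)

instance (red_pos : String) (green_pos : String) : Decidable (Pre_min_meeting_moves red_pos green_pos) := by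
  unfold Pre_min_meeting_moves
  rcases red_pos.toList with _ | ⟨a, _ | ⟨b, l⟩⟩ <;> rcases green_pos.toList with _ | ⟨c, _ | ⟨d, m⟩⟩ <;>
    simp <;> infer_instance

def pvWitness_min_meeting_moves : String × String := ("a1", "c5")

def Spec_min_meeting_moves (red_pos : String) (green_pos : String) (out : Int) : Prop := out = min_meeting_moves_alt red_pos green_pos
instance (red_pos : String) (green_pos : String) (out : Int) : Decidable (Spec_min_meeting_moves red_pos green_pos out) := by unfold Spec_min_meeting_moves; infer_instance

-- ===== CLAIM (what is proved, stated in full; the proofs are below) =====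
def Claim_equal_min_meeting_moves : Prop := ∀ (red_pos : String) (green_pos : String), Dom_min_meeting_moves red_pos green_pos → Pre_min_meeting_moves red_pos green_pos → Spec_min_meeting_moves red_pos green_pos (min_meeting_moves red_pos green_pos)

-- ===== LEMMAS AND PROOFS =====

-- ---------- shared abbreviations ----------

abbrev JPair := (Int × Int) × (Int × Int)

def jm (c : Int × Int) : List (Int × Int) := get_knight_moves c.1 c.2

def jsucc (p q : JPair) : Prop := q.1 ∈ jm p.1 ∧ q.2 ∈ jm p.2

def meets (p : JPair) : Prop := ∃ c, c ∈ jm p.1 ∧ c ∈ jm p.2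

def entmap (m : Int) (P : List JPair) : List ((Int × Int) × (Int × Int) × Int) :=
  P.map (fun p => (p.1, p.2, m))

def smap (P : List JPair) : List VElem := P.map VElem.state

def boardCell (c : Int × Int) : Prop := 0 ≤ c.1 ∧ c.1 < 8 ∧ 0 ≤ c.2 ∧ c.2 < 8

def boardP (p : JPair) : Prop := boardCell p.1 ∧ boardCell p.2

def allCells : List (Int × Int) :=
  (PySem.List.pyRange 0 8 1).flatMap (fun r => (PySem.List.pyRange 0 8 1).map (fun c => (r, c)))

def univL (start : JPair) : List JPair :=
  start :: allCells.flatMap (fun a => allCells.map (fun b => (a, b)))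

-- ghost intermediate (the joint BFS of A, run level-synchronously); proof-only
def stepsB (cell : Int × Int) : PySem.Set (Int × Int) :=
  deltasB.foldl (fun s d =>
    if 0 ≤ cell.1 + d.1 ∧ cell.1 + d.1 < 8 ∧ 0 ≤ cell.2 + d.2 ∧ cell.2 + d.2 < 8 then
      s.add (cell.1 + d.1, cell.2 + d.2)
    else s) PySem.Set.empty

def genB (frontier : PySem.Set ((Int × Int) × (Int × Int))) :
    PySem.Set ((Int × Int) × (Int × Int)) :=
  frontier.foldl (fun g ab =>
    (stepsB ab.1).foldl (fun g a2 =>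
      (stepsB ab.2).foldl (fun g b2 => g.add (a2, b2)) g) g) PySem.Set.empty

def loopB : Nat → Int → PySem.Set ((Int × Int) × (Int × Int)) →
    PySem.Set ((Int × Int) × (Int × Int)) → Int
  | 0, _, _, _ => -1
  | fuel + 1, k, frontier, seen =>
    match frontier with
    | [] => -1
    | _ :: _ =>
      let k' := k + 1
      let gen := genB frontier
      if gen.any (fun p => p.1 == p.2) then k'
      else
        let fr' := PySem.Set.diff gen seen
        loopB fuel k' fr' (PySem.Set.union seen fr')

-- ---------- walk semantics (the common spec of both programs) ----------

-- wlk s k x: the knight starting on s has a walk of length exactly k ending on x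
def wlk (s : Int × Int) : Nat → (Int × Int) → Prop
  | 0, x => x = s
  | k + 1, x => ∃ y, wlk s k y ∧ x ∈ jm y

def MeetAt (red green : Int × Int) (k : Nat) : Prop :=
  ∃ s, wlk red k s ∧ wlk green k s

def JW (red green : Int × Int) (k : Nat) (q : JPair) : Prop :=
  wlk red k q.1 ∧ wlk green k q.2

def sphereP (red green : Int × Int) (k : Nat) (q : JPair) : Prop :=
  JW red green k q ∧ ∀ j < k, ¬ JW red green j q

def ballP (red green : Int × Int) (k : Nat) (q : JPair) : Prop :=
  ∃ j ≤ k, JW red green j q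

-- the common answer: the first level (≥ 1) at which the knights can meet, else -1
noncomputable def ans (red green : Int × Int) : Int :=
  @dite _ (∃ m, 1 ≤ m ∧ MeetAt red green m) (Classical.propDecidable _)
    (fun _ => ((sInf {m | 1 ≤ m ∧ MeetAt red green m} : Nat) : Int))
    (fun _ => -1)

lemma wlk_zero {s x : Int × Int} : wlk s 0 x ↔ x = s := Iff.rfl

lemma wlk_succ {s x : Int × Int} {k : Nat} :
    wlk s (k + 1) x ↔ ∃ y, wlk s k y ∧ x ∈ jm y := Iff.rfl

lemma ans_first {red green : Int × Int} {m : Nat} (hm1 : 1 ≤ m)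
    (hm : MeetAt red green m) (hfirst : ∀ j, 1 ≤ j → j < m → ¬ MeetAt red green j) :
    ans red green = (m : Int) := by
  have hex : ∃ m', 1 ≤ m' ∧ MeetAt red green m' := ⟨m, hm1, hm⟩
  unfold ans
  rw [dif_pos hex]
  norm_cast
  have h1 : sInf {m' | 1 ≤ m' ∧ MeetAt red green m'} ≤ m := Nat.sInf_le ⟨hm1, hm⟩
  have h2 : sInf {m' | 1 ≤ m' ∧ MeetAt red green m'} ∈ {m' | 1 ≤ m' ∧ MeetAt red green m'} :=
    Nat.sInf_mem hex
  by_contra hne'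
  exact hfirst _ h2.1 (lt_of_le_of_ne h1 hne') h2.2

lemma ans_none {red green : Int × Int}
    (h : ∀ m, 1 ≤ m → ¬ MeetAt red green m) : ans red green = -1 := by
  unfold ans
  rw [dif_neg]
  rintro ⟨m, h1, h2⟩
  exact h m h1 h2

-- ---------- knight-move characterizations ----------

lemma gkm_eq (r c : Int) :
    get_knight_moves r c =
      (knightDeltas.filter (fun d =>
        decide (0 ≤ r + d.1 ∧ r + d.1 < 8 ∧ 0 ≤ c + d.2 ∧ c + d.2 < 8))).map
        (fun d => (r + d.1, c + d.2)) := by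
  unfold get_knight_moves
  rw [show (fun (moves : List (Int × Int)) (d : Int × Int) =>
        if 0 ≤ r + d.1 ∧ r + d.1 < 8 ∧ 0 ≤ c + d.2 ∧ c + d.2 < 8 then
          moves ++ [(r + d.1, c + d.2)]
        else moves)
      = (fun moves d =>
        if (fun d : Int × Int =>
            decide (0 ≤ r + d.1 ∧ r + d.1 < 8 ∧ 0 ≤ c + d.2 ∧ c + d.2 < 8)) d = true then
          moves ++ [(fun d : Int × Int => (r + d.1, c + d.2)) d]
        else moves) from by funext m d; simp]
  rw [PySem.List.foldl_append_if]
  simp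

lemma mem_jm {x : Int × Int} {p : Int × Int} :
    x ∈ jm p ↔ ∃ d ∈ knightDeltas,
      (0 ≤ p.1 + d.1 ∧ p.1 + d.1 < 8 ∧ 0 ≤ p.2 + d.2 ∧ p.2 + d.2 < 8) ∧
      x = (p.1 + d.1, p.2 + d.2) := by
  rw [jm, gkm_eq]
  simp only [List.mem_map, List.mem_filter, decide_eq_true_eq]
  constructor
  · rintro ⟨d, ⟨hd, hc⟩, rfl⟩; exact ⟨d, hd, hc, rfl⟩
  · rintro ⟨d, hd, hc, rfl⟩; exact ⟨d, ⟨hd, hc⟩, rfl⟩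

lemma jm_board {x p : Int × Int} (h : x ∈ jm p) : boardCell x := by
  rcases mem_jm.1 h with ⟨d, _, hc, rfl⟩
  exact ⟨hc.1, hc.2.1, hc.2.2.1, hc.2.2.2⟩

lemma jm_ne {x p : Int × Int} (h : x ∈ jm p) : x ≠ p := by
  rcases mem_jm.1 h with ⟨d, hd, _, rfl⟩
  simp only [knightDeltas, List.mem_cons, List.not_mem_nil, or_false] at hd
  rcases hd with rfl | rfl | rfl | rfl | rfl | rfl | rfl | rfl <;>
    simp [Prod.ext_iff]

lemma jm_symm {x y : Int × Int} (hx : boardCell x) (h : y ∈ jm x) : x ∈ jm y := by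
  rcases mem_jm.1 h with ⟨d, hd, hc, rfl⟩
  obtain ⟨h1, h2, h3, h4⟩ := hx
  apply mem_jm.2
  refine ⟨(-d.1, -d.2), ?_, ⟨by omega, by omega, by omega, by omega⟩, ?_⟩
  · simp only [knightDeltas, List.mem_cons, List.not_mem_nil, or_false] at hd ⊢
    rcases hd with rfl | rfl | rfl | rfl | rfl | rfl | rfl | rfl <;> norm_num
  · obtain ⟨x1, x2⟩ := x
    simp only [Prod.mk.injEq]
    constructor <;> ring

lemma board_has_nbr {x : Int × Int} (hx : boardCell x) : ∃ y, y ∈ jm x := by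
  obtain ⟨h1, h2, h3, h4⟩ := hx
  by_cases hr : x.1 ≤ 5
  · by_cases hc : x.2 ≤ 6
    · exact ⟨(x.1 + 2, x.2 + 1),
        mem_jm.2 ⟨(2, 1), by simp [knightDeltas], by constructor <;> omega, rfl⟩⟩
    · exact ⟨(x.1 + 2, x.2 + -1),
        mem_jm.2 ⟨(2, -1), by simp [knightDeltas], by constructor <;> omega, rfl⟩⟩
  · by_cases hc : x.2 ≤ 6
    · exact ⟨(x.1 + -2, x.2 + 1),
        mem_jm.2 ⟨(-2, 1), by simp [knightDeltas], by constructor <;> omega, rfl⟩⟩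
    · exact ⟨(x.1 + -2, x.2 + -1),
        mem_jm.2 ⟨(-2, -1), by simp [knightDeltas], by constructor <;> omega, rfl⟩⟩

lemma mem_foldl_add_of {α β : Type} [BEq β] [LawfulBEq β] (f : α → β) (p : α → Prop)
    [DecidablePred p] :
    ∀ (l : List α) (s : PySem.Set β) (x : β),
      x ∈ l.foldl (fun s d => if p d then s.add (f d) else s) s
        ↔ x ∈ s ∨ ∃ d ∈ l, p d ∧ x = f d := by
  intro l
  induction l with
  | nil => simp
  | cons d l ih =>
    intro s x
    simp only [List.foldl_cons]
    by_cases h : p d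
    · rw [if_pos h, ih]
      simp only [PySem.Set.mem_add, List.mem_cons]
      constructor
      · rintro ((hs | rfl) | ⟨d', hd', hp', rfl⟩)
        · exact Or.inl hs
        · exact Or.inr ⟨d, Or.inl rfl, h, rfl⟩
        · exact Or.inr ⟨d', Or.inr hd', hp', rfl⟩
      · rintro (hs | ⟨d', (rfl | hd'), hp', rfl⟩)
        · exact Or.inl (Or.inl hs)
        · exact Or.inl (Or.inr rfl)
        · exact Or.inr ⟨d', hd', hp', rfl⟩
    · rw [if_neg h, ih]
      simp only [List.mem_cons]
      constructor
      · rintro (hs | ⟨d', hd', hp', rfl⟩)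
        · exact Or.inl hs
        · exact Or.inr ⟨d', Or.inr hd', hp', rfl⟩
      · rintro (hs | ⟨d', (rfl | hd'), hp', rfl⟩)
        · exact Or.inl hs
        · exact absurd hp' h
        · exact Or.inr ⟨d', hd', hp', rfl⟩

lemma mem_stepsB {x c : Int × Int} : x ∈ stepsB c ↔ x ∈ jm c := by
  rw [stepsB, mem_foldl_add_of
    (fun d : Int × Int => (c.1 + d.1, c.2 + d.2))
    (fun d : Int × Int => 0 ≤ c.1 + d.1 ∧ c.1 + d.1 < 8 ∧ 0 ≤ c.2 + d.2 ∧ c.2 + d.2 < 8),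
    mem_jm]
  rw [show deltasB = knightDeltas from rfl]
  simp [PySem.Set.empty]

-- ---------- stepB (B's per-knight frontier expansion) ----------

lemma mem_stepB {x : Int × Int} {S : PySem.Set (Int × Int)} :
    x ∈ stepB S ↔ ∃ c ∈ S, x ∈ jm c := by
  have inner : ∀ (c : Int × Int) (s : PySem.Set (Int × Int)) (x : Int × Int),
      x ∈ deltasB.foldl (fun s d =>
          if 0 ≤ c.1 + d.1 ∧ c.1 + d.1 < 8 ∧ 0 ≤ c.2 + d.2 ∧ c.2 + d.2 < 8 then
            s.add (c.1 + d.1, c.2 + d.2)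
          else s) s
        ↔ x ∈ s ∨ x ∈ jm c := by
    intro c s x
    rw [mem_foldl_add_of
      (fun d : Int × Int => (c.1 + d.1, c.2 + d.2))
      (fun d : Int × Int => 0 ≤ c.1 + d.1 ∧ c.1 + d.1 < 8 ∧ 0 ≤ c.2 + d.2 ∧ c.2 + d.2 < 8),
      mem_jm]
    rw [show deltasB = knightDeltas from rfl]
  have main : ∀ (L : List (Int × Int)) (s : PySem.Set (Int × Int)) (x : Int × Int),
      x ∈ L.foldl (fun s rc =>
          deltasB.foldl (fun s d =>
            if 0 ≤ rc.1 + d.1 ∧ rc.1 + d.1 < 8 ∧ 0 ≤ rc.2 + d.2 ∧ rc.2 + d.2 < 8 then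
              s.add (rc.1 + d.1, rc.2 + d.2)
            else s) s) s
        ↔ x ∈ s ∨ ∃ c ∈ L, x ∈ jm c := by
    intro L
    induction L with
    | nil => simp
    | cons c L ih =>
      intro s x
      simp only [List.foldl_cons, ih, inner, List.mem_cons]
      constructor
      · rintro ((hs | hc) | ⟨c', hc', hx⟩)
        · exact Or.inl hs
        · exact Or.inr ⟨c, Or.inl rfl, hc⟩
        · exact Or.inr ⟨c', Or.inr hc', hx⟩
      · rintro (hs | ⟨c', (rfl | hc'), hx⟩)
        · exact Or.inl (Or.inl hs)
        · exact Or.inl (Or.inr hx)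
        · exact Or.inr ⟨c', hc', hx⟩
  rw [stepB, main]
  simp [PySem.Set.empty]

lemma nodup_foldl_step {α β : Type} (step : List β → α → List β)
    (hstep : ∀ g x, g.Nodup → (step g x).Nodup) :
    ∀ (l : List α) (acc : List β), acc.Nodup → (l.foldl step acc).Nodup := by
  intro l
  induction l with
  | nil => intro acc h; simpa using h
  | cons d l ih => intro acc h; exact ih _ (hstep _ _ h)

lemma nodup_stepB (S : PySem.Set (Int × Int)) : (stepB S).Nodup := by
  unfold stepB
  apply nodup_foldl_step
  · intro g rc hg
    apply nodup_foldl_step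
    · intro g' d hg'
      split_ifs
      · exact PySem.Set.nodup_add _ _ hg'
      · exact hg'
    · exact hg
  · exact List.nodup_nil

-- ---------- generic fold-into-set helpers (joint gen) ----------

lemma mem_genB {x : JPair} {F : PySem.Set JPair} :
    x ∈ genB F ↔ ∃ p ∈ F, jsucc p x := by
  have inner1 : ∀ (a2 : Int × Int) (bs : List (Int × Int)) (g : PySem.Set JPair) (x : JPair),
      x ∈ bs.foldl (fun g b2 => g.add (a2, b2)) g ↔ x ∈ g ∨ ∃ b2 ∈ bs, x = (a2, b2) := by
    intro a2 bs
    induction bs with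
    | nil => simp
    | cons b bs ih =>
      intro g x
      simp only [List.foldl_cons, ih, PySem.Set.mem_add, List.mem_cons]
      constructor
      · rintro ((hg | rfl) | ⟨b', hb', rfl⟩)
        · exact Or.inl hg
        · exact Or.inr ⟨b, Or.inl rfl, rfl⟩
        · exact Or.inr ⟨b', Or.inr hb', rfl⟩
      · rintro (hg | ⟨b', (rfl | hb'), rfl⟩)
        · exact Or.inl (Or.inl hg)
        · exact Or.inl (Or.inr rfl)
        · exact Or.inr ⟨b', hb', rfl⟩
  have inner2 : ∀ (p : JPair) (g : PySem.Set JPair) (x : JPair),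
      x ∈ (stepsB p.1).foldl
            (fun g a2 => (stepsB p.2).foldl (fun g b2 => g.add (a2, b2)) g) g
        ↔ x ∈ g ∨ jsucc p x := by
    intro p
    have : ∀ (as : List (Int × Int)) (g : PySem.Set JPair) (x : JPair),
        x ∈ as.foldl (fun g a2 => (stepsB p.2).foldl (fun g b2 => g.add (a2, b2)) g) g
          ↔ x ∈ g ∨ ∃ a2 ∈ as, ∃ b2 ∈ stepsB p.2, x = (a2, b2) := by
      intro as
      induction as with
      | nil => simp
      | cons a as ih =>
        intro g x
        simp only [List.foldl_cons, ih, inner1, List.mem_cons]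
        constructor
        · rintro ((hg | ⟨b2, hb2, rfl⟩) | ⟨a', ha', b2, hb2, rfl⟩)
          · exact Or.inl hg
          · exact Or.inr ⟨a, Or.inl rfl, b2, hb2, rfl⟩
          · exact Or.inr ⟨a', Or.inr ha', b2, hb2, rfl⟩
        · rintro (hg | ⟨a', (rfl | ha'), b2, hb2, rfl⟩)
          · exact Or.inl (Or.inl hg)
          · exact Or.inl (Or.inr ⟨b2, hb2, rfl⟩)
          · exact Or.inr ⟨a', ha', b2, hb2, rfl⟩
    intro g x
    rw [this]
    unfold jsucc
    constructor
    · rintro (hg | ⟨a2, ha2, b2, hb2, rfl⟩)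
      · exact Or.inl hg
      · exact Or.inr ⟨mem_stepsB.1 ha2, mem_stepsB.1 hb2⟩
    · rintro (hg | ⟨h1, h2⟩)
      · exact Or.inl hg
      · exact Or.inr ⟨x.1, mem_stepsB.2 h1, x.2, mem_stepsB.2 h2, rfl⟩
  have main : ∀ (F : List JPair) (g : PySem.Set JPair) (x : JPair),
      x ∈ F.foldl (fun g ab =>
          (stepsB ab.1).foldl
            (fun g a2 => (stepsB ab.2).foldl (fun g b2 => g.add (a2, b2)) g) g) g
        ↔ x ∈ g ∨ ∃ p ∈ F, jsucc p x := by
    intro F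
    induction F with
    | nil => simp
    | cons p F ih =>
      intro g x
      simp only [List.foldl_cons, ih, inner2, List.mem_cons]
      constructor
      · rintro ((hg | hj) | ⟨p', hp', hj⟩)
        · exact Or.inl hg
        · exact Or.inr ⟨p, Or.inl rfl, hj⟩
        · exact Or.inr ⟨p', Or.inr hp', hj⟩
      · rintro (hg | ⟨p', (rfl | hp'), hj⟩)
        · exact Or.inl (Or.inl hg)
        · exact Or.inl (Or.inr hj)
        · exact Or.inr ⟨p', hp', hj⟩
  rw [genB, main]
  simp [PySem.Set.empty]

lemma nodup_genB (F : PySem.Set JPair) : (genB F).Nodup := by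
  unfold genB
  apply nodup_foldl_step
  · intro g ab hg
    apply nodup_foldl_step
    · intro g' a2 hg'
      apply nodup_foldl_step
      · intro g'' b2 hg''; exact PySem.Set.nodup_add _ _ hg''
      · exact hg'
    · exact hg
  · exact List.nodup_nil

lemma genB_board {x : JPair} {F : PySem.Set JPair} (h : x ∈ genB F) : boardP x := by
  rcases mem_genB.1 h with ⟨p, _, h1, h2⟩
  exact ⟨jm_board h1, jm_board h2⟩

lemma anyMeet {F : PySem.Set JPair} :
    ((genB F).any (fun p => p.1 == p.2)) = true ↔ ∃ p ∈ F, meets p := by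
  rw [List.any_eq_true]
  constructor
  · rintro ⟨p, hp, hb⟩
    rcases mem_genB.1 hp with ⟨q, hq, h1, h2⟩
    refine ⟨q, hq, p.1, h1, ?_⟩
    rw [show p.1 = p.2 from by simpa using hb]
    exact h2
  · rintro ⟨q, hq, c, h1, h2⟩
    exact ⟨(c, c), mem_genB.2 ⟨q, hq, h1, h2⟩, by simp⟩

-- ---------- cardinality helpers ----------

lemma nodup_length_le {α : Type} [DecidableEq α] {l L : List α}
    (h : l.Nodup) (hsub : ∀ x ∈ l, x ∈ L) : l.length ≤ L.length := by
  calc l.length = l.toFinset.card := (List.toFinset_card_of_nodup h).symm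
    _ ≤ L.toFinset.card := Finset.card_le_card (by
        intro x hx
        rw [List.mem_toFinset] at hx ⊢
        exact hsub x hx)
    _ ≤ L.length := List.toFinset_card_le L

lemma nodup_length_lt {α : Type} [DecidableEq α] {l L : List α}
    (h : l.Nodup) (hL : L.Nodup) (hsub : ∀ x ∈ l, x ∈ L)
    {x : α} (hx : x ∈ L) (hnx : x ∉ l) : l.length + 1 ≤ L.length := by
  have h1 : l.toFinset ⊆ L.toFinset := fun a ha =>
    List.mem_toFinset.2 (hsub a (List.mem_toFinset.1 ha))
  have h2 : l.toFinset ≠ L.toFinset := by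
    intro he
    exact hnx (List.mem_toFinset.1 (he ▸ List.mem_toFinset.2 hx))
  have hcard : l.toFinset.card < L.toFinset.card :=
    Finset.card_lt_card (ssubset_of_subset_of_ne h1 h2)
  rw [List.toFinset_card_of_nodup h, List.toFinset_card_of_nodup hL] at hcard
  omega

lemma mem_allCells {c : Int × Int} (h : boardCell c) : c ∈ allCells := by
  obtain ⟨h1, h2, h3, h4⟩ := h
  simp only [allCells, List.mem_flatMap, List.mem_map, PySem.List.mem_pyRange_one]
  exact ⟨c.1, ⟨h1, h2⟩, c.2, ⟨h3, h4⟩, by simp⟩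

lemma mem_univL {start x : JPair} (h : x = start ∨ boardP x) : x ∈ univL start := by
  rcases h with rfl | ⟨h1, h2⟩
  · exact List.mem_cons_self
  · refine List.mem_cons_of_mem _ ?_
    simp only [List.mem_flatMap, List.mem_map]
    exact ⟨x.1, mem_allCells h1, x.2, mem_allCells h2, rfl⟩

lemma length_univL (start : JPair) : (univL start).length = 4097 := by
  simp only [univL, List.length_cons]
  have h4096 : (allCells.flatMap fun a => allCells.map fun b => ((a, b) : JPair)).length = 4096 := by
    rw [List.length_flatMap]
    have h64 : allCells.length = 64 := by decide
    rw [show (List.map (fun a => (List.map (fun b => ((a, b) : JPair)) allCells).length) allCells)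
         = List.map (Function.const (Int × Int) 64) allCells from by simp [List.length_map, h64]]
    rw [List.map_const, h64, List.sum_replicate]
    rfl
  omega

lemma nodup_same_length {α : Type} [DecidableEq α] {l l' : List α}
    (h : l.Nodup) (h' : l'.Nodup) (hm : ∀ x, x ∈ l ↔ x ∈ l') :
    l.length = l'.length := by
  exact Nat.le_antisymm (nodup_length_le h fun x hx => (hm x).1 hx)
    (nodup_length_le h' fun x hx => (hm x).2 hx)

-- ---------- A-side loop characterizations ----------

@[simp] lemma entmap_nil (m : Int) : entmap m [] = [] := rfl
@[simp] lemma entmap_cons (m : Int) (p : JPair) (l : List JPair) :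
    entmap m (p :: l) = (p.1, p.2, m) :: entmap m l := rfl
@[simp] lemma entmap_append (m : Int) (l l' : List JPair) :
    entmap m (l ++ l') = entmap m l ++ entmap m l' := List.map_append
@[simp] lemma smap_nil : smap [] = [] := rfl
@[simp] lemma smap_cons (p : JPair) (l : List JPair) :
    smap (p :: l) = VElem.state p :: smap l := rfl
@[simp] lemma smap_append (l l' : List JPair) :
    smap (l ++ l') = smap l ++ smap l' := List.map_append
@[simp] lemma mem_smap {x : JPair} {l : List JPair} :
    VElem.state x ∈ smap l ↔ x ∈ l := by
  unfold smap
  rw [List.mem_map]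
  constructor
  · rintro ⟨y, hy, he⟩
    cases he
    exact hy
  · intro hx
    exact ⟨x, hx, rfl⟩

lemma innerA_spec (nr : Int × Int) (m : Int) :
    ∀ (gs : List (Int × Int)) (q : List ((Int × Int) × (Int × Int) × Int)) (v : PySem.Set VElem),
    ((∃ ng ∈ gs, nr = ng) → (innerA nr m gs q v).1 = some (m + 1)) ∧
    ((∀ ng ∈ gs, nr ≠ ng) → ∃ new : List JPair,
        innerA nr m gs q v = (none, q ++ entmap (m + 1) new, v ++ smap new) ∧
        new.Nodup ∧
        (∀ x : JPair, x ∈ new ↔ x.1 = nr ∧ x.2 ∈ gs ∧ VElem.state x ∉ v)) := by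
  intro gs
  induction gs with
  | nil =>
    intro q v
    constructor
    · rintro ⟨ng, h, -⟩
      exact absurd h List.not_mem_nil
    · intro _
      exact ⟨[], by simp [innerA], List.nodup_nil, by simp⟩
  | cons ng gs ih =>
    intro q v
    by_cases h1 : nr = ng
    · constructor
      · intro _
        rw [innerA, if_pos h1]
      · intro hall
        exact absurd h1 (hall ng List.mem_cons_self)
    · by_cases h2 : v.contains (VElem.state (nr, ng)) = true
      · have hmem : VElem.state (nr, ng) ∈ v := (PySem.Set.contains_iff v _).1 h2
        have hstep : innerA nr m (ng :: gs) q v = innerA nr m gs q v := by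
          rw [innerA, if_neg h1, if_pos h2]
        constructor
        · rintro ⟨g, hg, rfl⟩
          rcases List.mem_cons.1 hg with rfl | hg
          · exact absurd rfl h1
          · rw [hstep]
            exact (ih q v).1 ⟨nr, hg, rfl⟩
        · intro hall
          rcases (ih q v).2 (fun g hg => hall g (List.mem_cons_of_mem _ hg)) with
            ⟨new, heq, hnd, hiff⟩
          refine ⟨new, by rw [hstep]; exact heq, hnd, ?_⟩
          rintro ⟨xa, xb⟩
          simp only [hiff, List.mem_cons]
          constructor
          · rintro ⟨rfl, hb, hc⟩
            exact ⟨rfl, Or.inr hb, hc⟩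
          · rintro ⟨rfl, (rfl | hb), hc⟩
            · exact absurd hmem hc
            · exact ⟨rfl, hb, hc⟩
      · have hnotmem : VElem.state (nr, ng) ∉ v := fun hx =>
          h2 ((PySem.Set.contains_iff v _).2 hx)
        have hstep : innerA nr m (ng :: gs) q v
            = innerA nr m gs (q ++ [(nr, ng, m + 1)]) (v.add (VElem.state (nr, ng))) := by
          rw [innerA, if_neg h1, if_neg h2]
        have hadd : v.add (VElem.state (nr, ng)) = v ++ [VElem.state (nr, ng)] :=
          PySem.Set.add_of_not_mem hnotmem
        constructor
        · rintro ⟨g, hg, rfl⟩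
          rcases List.mem_cons.1 hg with rfl | hg
          · exact absurd rfl h1
          · rw [hstep]
            exact (ih _ _).1 ⟨nr, hg, rfl⟩
        · intro hall
          rcases (ih (q ++ [(nr, ng, m + 1)]) (v.add (VElem.state (nr, ng)))).2
            (fun g hg => hall g (List.mem_cons_of_mem _ hg)) with ⟨new, heq, hnd, hiff⟩
          rw [hadd] at hiff
          refine ⟨(nr, ng) :: new, ?_, ?_, ?_⟩
          · rw [hstep, heq, hadd]
            simp
          · refine List.nodup_cons.2 ⟨?_, hnd⟩
            intro hc
            have := (hiff _).1 hc
            simp at this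
          · rintro ⟨xa, xb⟩
            simp only [List.mem_cons, hiff, List.mem_append, Prod.mk.injEq,
              VElem.state.injEq, not_or]
            constructor
            · rintro (⟨rfl, rfl⟩ | ⟨rfl, hb, hc, hd⟩)
              · exact ⟨rfl, Or.inl rfl, hnotmem⟩
              · exact ⟨rfl, Or.inr hb, hc⟩
            · rintro ⟨rfl, (rfl | hb), hc⟩
              · exact Or.inl ⟨rfl, rfl⟩
              · by_cases hx : xb = ng
                · subst hx
                  exact Or.inl ⟨rfl, rfl⟩
                · exact Or.inr ⟨rfl, hb, hc, by simp [hx]⟩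

lemma outerA_spec (pg : Int × Int) (m : Int) :
    ∀ (rs : List (Int × Int)) (q : List ((Int × Int) × (Int × Int) × Int)) (v : PySem.Set VElem),
    ((∃ nr ∈ rs, nr ∈ jm pg) → (outerA pg m rs q v).1 = some (m + 1)) ∧
    ((∀ nr ∈ rs, nr ∉ jm pg) → ∃ new : List JPair,
        outerA pg m rs q v = (none, q ++ entmap (m + 1) new, v ++ smap new) ∧
        new.Nodup ∧
        (∀ x : JPair, x ∈ new ↔ x.1 ∈ rs ∧ x.2 ∈ jm pg ∧ VElem.state x ∉ v)) := by
  intro rs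
  induction rs with
  | nil =>
    intro q v
    constructor
    · rintro ⟨nr, h, -⟩
      exact absurd h List.not_mem_nil
    · intro _
      exact ⟨[], by simp [outerA], List.nodup_nil, by simp⟩
  | cons nr rs ih =>
    intro q v
    obtain ⟨hin1, hin2⟩ := innerA_spec nr m (get_knight_moves pg.1 pg.2) q v
    by_cases hm : nr ∈ jm pg
    · have h1 : (innerA nr m (get_knight_moves pg.1 pg.2) q v).1 = some (m + 1) :=
        hin1 ⟨nr, hm, rfl⟩
      constructor
      · intro _
        rw [outerA]
        rcases hinner : innerA nr m (get_knight_moves pg.1 pg.2) q v with ⟨o, q', v'⟩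
        rw [hinner] at h1
        simp only at h1
        subst h1
        rfl
      · intro hall
        exact absurd hm (hall nr List.mem_cons_self)
    · rcases hin2 (fun ng hng heq => hm (by rw [heq]; exact hng)) with ⟨new1, heq1, hnd1, hiff1⟩
      have houter : outerA pg m (nr :: rs) q v
          = outerA pg m rs (q ++ entmap (m + 1) new1) (v ++ smap new1) := by
        rw [outerA, heq1]
      obtain ⟨hih1, hih2⟩ := ih (q ++ entmap (m + 1) new1) (v ++ smap new1)
      constructor
      · rintro ⟨nr', hnr', hm'⟩
        rcases List.mem_cons.1 hnr' with rfl | hnr'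
        · exact absurd hm' hm
        · rw [houter]
          exact hih1 ⟨nr', hnr', hm'⟩
      · intro hall
        rcases hih2 (fun r hr => hall r (List.mem_cons_of_mem _ hr)) with
          ⟨new2, heq2, hnd2, hiff2⟩
        refine ⟨new1 ++ new2, ?_, ?_, ?_⟩
        · rw [houter, heq2]
          simp [List.append_assoc]
        · rw [List.nodup_append]
          refine ⟨hnd1, hnd2, ?_⟩
          intro x hx1 y hy
          rintro rfl
          have := (hiff2 x).1 hy
          simp only [List.mem_append, not_or, mem_smap] at this
          exact this.2.2.2 hx1
        · rintro ⟨xa, xb⟩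
          simp only [List.mem_append, hiff1, hiff2, List.mem_cons, not_or, mem_smap]
          constructor
          · rintro (⟨rfl, hj, hv⟩ | ⟨hx, hj, hv, hn⟩)
            · exact ⟨Or.inl rfl, hj, hv⟩
            · exact ⟨Or.inr hx, hj, hv⟩
          · rintro ⟨hx, hj, hv⟩
            by_cases hn : xa = nr ∧ xb ∈ get_knight_moves pg.1 pg.2 ∧
                VElem.state ((xa, xb) : JPair) ∉ v
            · exact Or.inl hn
            · rcases hx with rfl | hx
              · exact Or.inl ⟨rfl, hj, hv⟩
              · exact Or.inr ⟨hx, hj, hv, hn⟩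

lemma bfsA_nil (f : Nat) (v : PySem.Set VElem) : bfsA f [] v = -1 := by
  cases f <;> rfl

lemma bfsA_level (m : Int) :
    ∀ (P : List JPair) (D : List ((Int × Int) × (Int × Int) × Int)) (v : PySem.Set VElem)
      (fuel : Nat),
    ((∃ p ∈ P, meets p) → bfsA (P.length + fuel) (entmap m P ++ D) v = m + 1) ∧
    ((∀ p ∈ P, ¬ meets p) → ∃ new : List JPair,
        bfsA (P.length + fuel) (entmap m P ++ D) v
          = bfsA fuel (D ++ entmap (m + 1) new) (v ++ smap new) ∧
        new.Nodup ∧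
        (∀ x : JPair, x ∈ new ↔ (∃ p ∈ P, jsucc p x) ∧ VElem.state x ∉ v)) := by
  intro P
  induction P with
  | nil =>
    intro D v fuel
    constructor
    · rintro ⟨p, h, -⟩
      exact absurd h List.not_mem_nil
    · intro _
      exact ⟨[], by simp, List.nodup_nil, by simp⟩
  | cons p P ih =>
    intro D v fuel
    have hshape : entmap m (p :: P) ++ D = (p.1, p.2, m) :: (entmap m P ++ D) := by simp
    have hlen : (p :: P).length + fuel = (P.length + fuel) + 1 := by
      simp only [List.length_cons]
      omega
    obtain ⟨ho1, ho2⟩ := outerA_spec p.2 m (get_knight_moves p.1.1 p.1.2) (entmap m P ++ D) v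
    have hmeet : ∀ (hmp : meets p), bfsA ((p :: P).length + fuel) (entmap m (p :: P) ++ D) v = m + 1 := by
      intro hmp
      have h1 := ho1 (by rcases hmp with ⟨c, hc1, hc2⟩; exact ⟨c, hc1, hc2⟩)
      rw [hlen, hshape, bfsA]
      rcases hout : outerA p.2 m (get_knight_moves p.1.1 p.1.2) (entmap m P ++ D) v with ⟨o, q', v'⟩
      rw [hout] at h1
      simp only at h1
      subst h1
      rfl
    have hnomeet : ∀ (hmp : ¬ meets p),
        ∃ new1 : List JPair,
          bfsA ((p :: P).length + fuel) (entmap m (p :: P) ++ D) v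
            = bfsA (P.length + fuel) (entmap m P ++ (D ++ entmap (m + 1) new1)) (v ++ smap new1) ∧
          new1.Nodup ∧
          (∀ x : JPair, x ∈ new1 ↔ jsucc p x ∧ VElem.state x ∉ v) := by
      intro hmp
      rcases ho2 (fun nr h1 h2 => hmp ⟨nr, h1, h2⟩) with ⟨new1, heq1, hnd1, hiff1⟩
      refine ⟨new1, ?_, hnd1, ?_⟩
      · rw [hlen, hshape, bfsA, heq1]
        simp [List.append_assoc]
      · intro x
        rw [hiff1]
        unfold jsucc
        tauto
    constructor
    · rintro ⟨p', hp', hm'⟩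
      rcases List.mem_cons.1 hp' with rfl | hp'
      · exact hmeet hm'
      · by_cases hmp : meets p
        · exact hmeet hmp
        · rcases hnomeet hmp with ⟨new1, heq1, hnd1, hiff1⟩
          rw [heq1]
          exact (ih (D ++ entmap (m + 1) new1) (v ++ smap new1) fuel).1 ⟨p', hp', hm'⟩
    · intro hall
      have hmp : ¬ meets p := hall p List.mem_cons_self
      rcases hnomeet hmp with ⟨new1, heq1, hnd1, hiff1⟩
      rcases (ih (D ++ entmap (m + 1) new1) (v ++ smap new1) fuel).2
        (fun r hr => hall r (List.mem_cons_of_mem _ hr)) with ⟨new2, heq2, hnd2, hiff2⟩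
      refine ⟨new1 ++ new2, ?_, ?_, ?_⟩
      · rw [heq1, heq2]
        simp [List.append_assoc]
      · rw [List.nodup_append]
        refine ⟨hnd1, hnd2, ?_⟩
        intro x hx1 y hy
        rintro rfl
        have := (hiff2 x).1 hy
        simp only [List.mem_append, not_or, mem_smap] at this
        exact this.2.2 hx1
      · intro x
        simp only [List.mem_append, hiff1, hiff2, List.mem_cons, not_or, mem_smap]
        constructor
        · rintro (⟨hj, hv⟩ | ⟨⟨p', hp', hj⟩, hv, hn⟩)
          · exact ⟨⟨p, Or.inl rfl, hj⟩, hv⟩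
          · exact ⟨⟨p', Or.inr hp', hj⟩, hv⟩
        · rintro ⟨⟨p', hp', hj⟩, hv⟩
          by_cases hn : jsucc p x ∧ VElem.state x ∉ v
          · exact Or.inl hn
          · rcases hp' with rfl | hp'
            · exact Or.inl ⟨hj, hv⟩
            · exact Or.inr ⟨⟨p', hp', hj⟩, hv, hn⟩

lemma loopB_nil (f : Nat) (m : Int) (S : PySem.Set JPair) : loopB f m [] S = -1 := by
  cases f <;> rfl

-- a queue that can only hold the start state drains to -1
lemma bfsA_only_start {start : JPair} {P : List JPair} {v : PySem.Set VElem}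
    {m : Int} {fa : Nat}
    (hP : ∀ x ∈ P, x = start)
    (hPnd : P.Nodup)
    (hN : ∀ x : JPair, jsucc start x → x.1 ≠ x.2 ∧ VElem.state x ∈ v)
    (hfa : 1 ≤ fa) :
    bfsA fa (entmap m P) v = -1 := by
  have hcase : P = [] ∨ P = [start] := by
    cases P with
    | nil => exact Or.inl rfl
    | cons a P' =>
      have ha : a = start := hP a List.mem_cons_self
      subst ha
      right
      have : P' = [] := by
        rw [List.eq_nil_iff_forall_not_mem]
        intro x hx
        have hxs : x = a := hP x (List.mem_cons_of_mem _ hx)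
        subst hxs
        exact (List.nodup_cons.1 hPnd).1 hx
      rw [this]
  rcases hcase with rfl | rfl
  · exact bfsA_nil fa v
  · obtain ⟨fa', rfl⟩ : ∃ fa', fa = 1 + fa' := ⟨fa - 1, by omega⟩
    have hnm : ∀ p ∈ [start], ¬ meets p := by
      rintro p hp ⟨c, h1, h2⟩
      rcases List.mem_cons.1 hp with rfl | h
      · exact (hN (c, c) ⟨h1, h2⟩).1 rfl
      · exact absurd h List.not_mem_nil
    rcases (bfsA_level m [start] [] v fa').2 hnm with ⟨new, heq, -, hiff⟩
    have hnew : new = [] := by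
      rw [List.eq_nil_iff_forall_not_mem]
      intro x hx
      rcases (hiff x).1 hx with ⟨⟨p, hp, hj⟩, hv⟩
      rcases List.mem_cons.1 hp with rfl | h
      · exact hv (hN x hj).2
      · exact absurd h List.not_mem_nil
    rw [show (1 + fa') = List.length [start] + fa' from by simp]
    rw [show entmap m [start] = entmap m [start] ++ [] from by simp]
    rw [heq, hnew]
    simpa using bfsA_nil fa' _

-- ---------- A-queue ↔ level-synchronous joint BFS (ghost) ----------

lemma mainLoop (start : JPair) :
    ∀ (fb fa : Nat) (m : Int) (P F S : List JPair) (v : PySem.Set VElem) (e b : Bool),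
    (∀ x, x ∈ P ↔ (x ∈ F ∨ (e = true ∧ x = start))) →
    P.Nodup → F.Nodup → S.Nodup →
    (∀ x ∈ F, x ∈ S) → start ∈ S →
    (∀ x : JPair, x ≠ start → (VElem.state x ∈ v ↔ x ∈ S)) →
    ((VElem.state start ∈ v) ↔ b = true) →
    (e = true → b = true) →
    (∀ x : JPair, jsucc start x → (x.1 ≠ x.2 ∧ VElem.state x ∈ v ∧ x ∈ S)) →
    (∀ x ∈ S, x = start ∨ boardP x) →
    P.length + (4097 - S.length) + 2 ≤ fa + (if b then 1 else 0) →
    1 + (4097 - S.length) ≤ fb →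
    bfsA fa (entmap m P) v = loopB fb m F S := by
  intro fb
  induction fb with
  | zero =>
    intro fa m P F S v e b hP hPnd hFnd hSnd hFS hSstart hV hVb he hN hSuniv hfa hfb
    omega
  | succ fb ih =>
    intro fa m P F S v e b hP hPnd hFnd hSnd hFS hSstart hV hVb he hN hSuniv hfa hfb
    have hSlen : S.length ≤ 4097 := by
      have := nodup_length_le hSnd (fun x hx => mem_univL (hSuniv x hx))
      rwa [length_univL] at this
    have hfa1 : 1 ≤ fa := by cases b <;> simp at hfa <;> omega
    cases F with
    | nil =>
      rw [show loopB (fb + 1) m [] S = -1 from rfl]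
      exact bfsA_only_start (fun x hx => ((hP x).1 hx).elim (by simp) And.right) hPnd
        (fun x hx => ⟨(hN x hx).1, (hN x hx).2.1⟩) hfa1
    | cons f0 F2 =>
      by_cases hmeet : ∃ p ∈ (f0 :: F2 : List JPair), meets p
      · have hB : loopB (fb + 1) m (f0 :: F2) S = m + 1 := by
          rw [loopB]
          simp only []
          rw [if_pos (anyMeet.2 hmeet)]
        rcases hmeet with ⟨p, hpF, hpm⟩
        have hfap : P.length ≤ fa := by cases b <;> simp at hfa <;> omega
        obtain ⟨fa', rfl⟩ : ∃ fa', fa = P.length + fa' := ⟨fa - P.length, by omega⟩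
        rw [hB]
        have := (bfsA_level m P [] v fa').1 ⟨p, (hP p).2 (Or.inl hpF), hpm⟩
        simpa using this
      · have hnomeetP : ∀ p ∈ P, ¬ meets p := by
          intro p hp
          rcases (hP p).1 hp with hpF | ⟨-, rfl⟩
          · exact fun hm => hmeet ⟨p, hpF, hm⟩
          · rintro ⟨c, h1, h2⟩
            exact (hN (c, c) ⟨h1, h2⟩).1 rfl
        have hfap : P.length ≤ fa := by cases b <;> simp at hfa <;> omega
        obtain ⟨fa', rfl⟩ : ∃ fa', fa = P.length + fa' := ⟨fa - P.length, by omega⟩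
        rcases (bfsA_level m P [] v fa').2 hnomeetP with ⟨new, heqA, hndnew, hiffnew⟩
        have heqA' : bfsA (P.length + fa') (entmap m P) v
            = bfsA fa' (entmap (m + 1) new) (v ++ smap new) := by simpa using heqA
        have hany : ¬ ((genB (f0 :: F2)).any (fun p => p.1 == p.2)) = true := fun h =>
          hmeet (anyMeet.1 h)
        have hB : loopB (fb + 1) m (f0 :: F2) S
            = loopB fb (m + 1) (PySem.Set.diff (genB (f0 :: F2)) S)
                (PySem.Set.union S (PySem.Set.diff (genB (f0 :: F2)) S)) := by
          rw [loopB]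
          simp only []
          rw [if_neg hany]
        set gen : PySem.Set JPair := genB (f0 :: F2) with hgdef
        set fr' : PySem.Set JPair := PySem.Set.diff gen S with hfdef
        set S' : PySem.Set JPair := PySem.Set.union S fr' with hsdef
        have hfr : ∀ x : JPair, x ∈ fr' ↔ (∃ p ∈ (f0 :: F2 : List JPair), jsucc p x) ∧ x ∉ S := by
          intro x
          rw [hfdef, PySem.Set.mem_diff, hgdef, mem_genB]
        have hmemS' : ∀ x : JPair, x ∈ S' ↔ x ∈ S ∨ x ∈ fr' := fun x => by
          rw [hsdef]
          exact PySem.Set.mem_union _ _ _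
        have hstartfr : start ∉ fr' := fun h => ((hfr start).1 h).2 hSstart
        have hfrnd : fr'.Nodup := PySem.Set.nodup_diff _ _ (nodup_genB _)
        have hS'nd : S'.Nodup := PySem.Set.nodup_union _ _ hSnd
        have hfrboard : ∀ x ∈ fr', boardP x := fun x hx =>
          genB_board (by rw [hfdef] at hx; exact (PySem.Set.mem_diff _ _ _ |>.1 hx).1)
        have hS'univ : ∀ x ∈ S', x = start ∨ boardP x := by
          intro x hx
          rcases (hmemS' x).1 hx with h | h
          · exact hSuniv x h
          · exact Or.inr (hfrboard x h)
        have hS'len : S'.length = S.length + fr'.length := by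
          have hdisj : (S ++ fr').Nodup := by
            rw [List.nodup_append]
            exact ⟨hSnd, hfrnd, fun x hx y hy hxy => ((hfr y).1 hy).2 (hxy ▸ hx)⟩
          have := nodup_same_length hS'nd hdisj (by
            intro x
            rw [hmemS' x, List.mem_append])
          rw [this, List.length_append]
        have hS'97 : S'.length ≤ 4097 := by
          have := nodup_length_le hS'nd (fun x hx => mem_univL (hS'univ x hx))
          rwa [length_univL] at this
        have hS97' : S.length + fr'.length ≤ 4097 := by rw [← hS'len]; exact hS'97
        have hnewfr : ∀ x : JPair, x ≠ start → (x ∈ new ↔ x ∈ fr') := by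
          intro x hx
          rw [hiffnew x, hfr x]
          constructor
          · rintro ⟨⟨p, hpP, hj⟩, hv⟩
            rcases (hP p).1 hpP with hpF | ⟨-, rfl⟩
            · exact ⟨⟨p, hpF, hj⟩, fun hxS => hv ((hV x hx).2 hxS)⟩
            · exact absurd (hN x hj).2.1 hv
          · rintro ⟨⟨p, hpF, hj⟩, hxS⟩
            exact ⟨⟨p, (hP p).2 (Or.inl hpF), hj⟩, fun hv => hxS ((hV x hx).1 hv)⟩
        rw [heqA', hB]
        by_cases hfre : fr' = []
        · rw [hfre, loopB_nil]
          refine bfsA_only_start (start := start) ?_ hndnew ?_ ?_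
          · intro x hx
            by_contra hxs
            have := (hnewfr x hxs).1 hx
            rw [hfre] at this
            exact absurd this List.not_mem_nil
          · intro x hx
            exact ⟨(hN x hx).1, List.mem_append.2 (Or.inl (hN x hx).2.1)⟩
          · cases b <;> simp at hfa <;> omega
        · have hfrlen : 1 ≤ fr'.length := List.length_pos_iff.2 hfre
          have hVnew : ∀ x : JPair, x ≠ start →
              (VElem.state x ∈ v ++ smap new ↔ x ∈ S') := by
            intro x hx
            rw [List.mem_append, mem_smap, hmemS' x, hV x hx, hnewfr x hx]
          have hNnew : ∀ x : JPair, jsucc start x →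
              x.1 ≠ x.2 ∧ VElem.state x ∈ v ++ smap new ∧ x ∈ S' := fun x hx =>
            ⟨(hN x hx).1, List.mem_append.2 (Or.inl (hN x hx).2.1),
              (hmemS' x).2 (Or.inl (hN x hx).2.2)⟩
          by_cases hsn : start ∈ new
          · have hbfalse : b = false := by
              have hnv := ((hiffnew start).1 hsn).2
              cases hbb : b
              · rfl
              · exact absurd (hVb.2 hbb) hnv
            have hnewiff : ∀ x : JPair, x ∈ new ↔ (x ∈ fr' ∨ (true = true ∧ x = start)) := by
              intro x
              by_cases hx : x = start
              · subst hx
                simp [hsn, hstartfr]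
              · rw [hnewfr x hx]
                simp [hx]
            have hlennew : new.length = fr'.length + 1 := by
              have : new.length = (start :: fr').length :=
                nodup_same_length hndnew (List.nodup_cons.2 ⟨hstartfr, hfrnd⟩) (by
                  intro x
                  rw [hnewiff x, List.mem_cons]
                  constructor
                  · rintro (h | ⟨-, rfl⟩)
                    · exact Or.inr h
                    · exact Or.inl rfl
                  · rintro (rfl | h)
                    · exact Or.inr ⟨rfl, rfl⟩
                    · exact Or.inl h)
              rw [this, List.length_cons]
            refine ih fa' (m + 1) new fr' S' (v ++ smap new) true true hnewiff hndnew hfrnd hS'nd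
              (fun x hx => (hmemS' x).2 (Or.inr hx))
              ((hmemS' start).2 (Or.inl hSstart))
              hVnew ?_ (fun _ => rfl) hNnew hS'univ ?_ ?_
            · rw [List.mem_append, mem_smap]
              simp [hsn]
            · rw [hbfalse] at hfa
              rw [hlennew, hS'len]
              simp at hfa ⊢
              omega
            · rw [hS'len]
              omega
          · have hnewiff : ∀ x : JPair, x ∈ new ↔ (x ∈ fr' ∨ (false = true ∧ x = start)) := by
              intro x
              by_cases hx : x = start
              · subst hx
                simp [hsn, hstartfr]
              · rw [hnewfr x hx]
                simp
            have hlennew : new.length = fr'.length :=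
              nodup_same_length hndnew hfrnd (by
                intro x
                rw [hnewiff x]
                simp)
            refine ih fa' (m + 1) new fr' S' (v ++ smap new) false b hnewiff hndnew hfrnd hS'nd
              (fun x hx => (hmemS' x).2 (Or.inr hx))
              ((hmemS' start).2 (Or.inl hSstart))
              hVnew ?_ (by simp) hNnew hS'univ ?_ ?_
            · rw [List.mem_append, mem_smap]
              constructor
              · rintro (h | h)
                · exact hVb.1 h
                · exact absurd h hsn
              · intro h
                exact Or.inl (hVb.2 h)
            · rw [hlennew, hS'len]
              cases b <;> simp at hfa ⊢ <;> omega
            · rw [hS'len]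
              omega

lemma core_eq (rs gs : Int × Int) (hne : rs ≠ gs) :
    bfsA 5000 [(rs, gs, 0)] (PySem.Set.ofList [VElem.pos rs, VElem.pos gs])
      = loopB 5000 0 (PySem.Set.ofList [((rs, gs) : JPair)])
          (PySem.Set.ofList [((rs, gs) : JPair)]) := by
  set start : JPair := (rs, gs) with hstdef
  have hv0 : PySem.Set.ofList [VElem.pos rs, VElem.pos gs] = [VElem.pos rs, VElem.pos gs] :=
    PySem.Set.ofList_eq_self_of_nodup _ (by simp [hne])
  have hs0 : PySem.Set.ofList [start] = [start] :=
    PySem.Set.ofList_eq_self_of_nodup _ (List.nodup_singleton _)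
  have hnostate : ∀ x : JPair, VElem.state x ∉ ([VElem.pos rs, VElem.pos gs] : List VElem) := by
    intro x h
    simp [List.mem_cons] at h
  have hstartself : ¬ jsucc start start := fun h => jm_ne h.1 rfl
  rw [hv0, hs0]
  have hA0 : bfsA 5000 [(rs, gs, 0)] [VElem.pos rs, VElem.pos gs]
      = bfsA ([start].length + 4999) (entmap 0 [start] ++ []) [VElem.pos rs, VElem.pos gs] := rfl
  obtain ⟨hl1, hl2⟩ := bfsA_level 0 [start] [] [VElem.pos rs, VElem.pos gs] 4999
  have h5000 : (5000 : Nat) = 4999 + 1 := by norm_num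
  by_cases hm : meets start
  · rw [hA0, hl1 ⟨start, List.mem_cons_self, hm⟩, h5000, loopB]
    simp only []
    rw [if_pos (anyMeet.2 ⟨start, List.mem_cons_self, hm⟩)]
  · rcases hl2 (by
      rintro p hp hmp
      rcases List.mem_cons.1 hp with rfl | h
      · exact hm hmp
      · exact absurd h List.not_mem_nil) with ⟨new, heqA, hndnew, hiffnew⟩
    have hiffs : ∀ x : JPair, x ∈ new ↔ jsucc start x := by
      intro x
      rw [hiffnew x]
      constructor
      · rintro ⟨⟨p, hp, hj⟩, -⟩
        rcases List.mem_cons.1 hp with rfl | h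
        · exact hj
        · exact absurd h List.not_mem_nil
      · intro hj
        exact ⟨⟨start, List.mem_cons_self, hj⟩, hnostate x⟩
    have hB0 : loopB 5000 0 [start] [start]
        = loopB 4999 1 (PySem.Set.diff (genB [start]) [start])
            (PySem.Set.union [start] (PySem.Set.diff (genB [start]) [start])) := by
      rw [h5000, loopB]
      simp only []
      rw [if_neg (fun h => hm (by
        rcases anyMeet.1 h with ⟨p, hp, hmp⟩
        rcases List.mem_cons.1 hp with rfl | hh
        · exact hmp
        · exact absurd hh List.not_mem_nil))]
      norm_num
    set fr1 : PySem.Set JPair := PySem.Set.diff (genB [start]) [start] with hf1def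
    set S1 : PySem.Set JPair := PySem.Set.union [start] fr1 with hs1def
    have hfr1 : ∀ x : JPair, x ∈ fr1 ↔ jsucc start x := by
      intro x
      rw [hf1def, PySem.Set.mem_diff, mem_genB]
      constructor
      · rintro ⟨⟨p, hp, hj⟩, -⟩
        rcases List.mem_cons.1 hp with rfl | h
        · exact hj
        · exact absurd h List.not_mem_nil
      · intro hj
        refine ⟨⟨start, List.mem_cons_self, hj⟩, ?_⟩
        intro hxs
        rcases List.mem_cons.1 hxs with rfl | h
        · exact hstartself hj
        · exact absurd h List.not_mem_nil
    have hmemS1 : ∀ x : JPair, x ∈ S1 ↔ x = start ∨ x ∈ fr1 := by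
      intro x
      rw [hs1def, PySem.Set.mem_union]
      simp [List.mem_cons]
    have hstartfr1 : start ∉ fr1 := fun h => hstartself ((hfr1 start).1 h)
    have hfr1nd : fr1.Nodup := PySem.Set.nodup_diff _ _ (nodup_genB _)
    have hS1nd : S1.Nodup := PySem.Set.nodup_union _ _ (List.nodup_singleton _)
    have hfr1board : ∀ x ∈ fr1, boardP x := by
      intro x hx
      rw [hf1def, PySem.Set.mem_diff] at hx
      exact genB_board hx.1
    have hS1univ : ∀ x ∈ S1, x = start ∨ boardP x := by
      intro x hx
      rcases (hmemS1 x).1 hx with rfl | h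
      · exact Or.inl rfl
      · exact Or.inr (hfr1board x h)
    have hS1len : S1.length = 1 + fr1.length := by
      have hdisj : (start :: fr1).Nodup := List.nodup_cons.2 ⟨hstartfr1, hfr1nd⟩
      have := nodup_same_length hS1nd hdisj (by
        intro x
        rw [hmemS1 x, List.mem_cons])
      rw [this, List.length_cons]
      omega
    have hS197 : S1.length ≤ 4097 := by
      have := nodup_length_le hS1nd (fun x hx => mem_univL (hS1univ x hx))
      rwa [length_univL] at this
    have hnewlen : new.length = fr1.length :=
      nodup_same_length hndnew hfr1nd (by
        intro x
        rw [hiffs x, hfr1 x])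
    have heqA' : bfsA 5000 [(rs, gs, 0)] [VElem.pos rs, VElem.pos gs]
        = bfsA 4999 (entmap 1 new) ([VElem.pos rs, VElem.pos gs] ++ smap new) := by
      rw [hA0]
      simpa using heqA
    rw [heqA', hB0]
    refine mainLoop start 4999 4999 1 new fr1 S1
      ([VElem.pos rs, VElem.pos gs] ++ smap new) false false ?_ hndnew hfr1nd hS1nd
      (fun x hx => (hmemS1 x).2 (Or.inr hx)) ((hmemS1 start).2 (Or.inl rfl))
      ?_ ?_ (by simp) ?_ hS1univ ?_ ?_
    · intro x
      rw [hiffs x, hfr1 x]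
      simp
    · intro x hx
      rw [List.mem_append, mem_smap, hiffs x, hmemS1 x, hfr1 x]
      constructor
      · rintro (h | h)
        · exact absurd h (hnostate x)
        · exact Or.inr h
      · rintro (rfl | h)
        · exact absurd rfl hx
        · exact Or.inr h
    · rw [List.mem_append, mem_smap, hiffs start]
      simp [hnostate start, hstartself]
    · intro x hx
      refine ⟨?_, List.mem_append.2 (Or.inr (mem_smap.2 ((hiffs x).2 hx))),
        (hmemS1 x).2 (Or.inr ((hfr1 x).2 hx))⟩
      rintro hxx
      rcases x with ⟨x1, x2⟩
      simp only at hxx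
      subst hxx
      exact hm ⟨x1, hx.1, hx.2⟩
    · rw [hnewlen, hS1len]
      simp only [Bool.false_eq_true, if_false]
      omega
    · rw [hS1len]
      omega

lemma parseB_eq (p : String) : parseB p = chess_to_coord p := by
  unfold parseB chess_to_coord
  rcases PySem.Str.pyGet? p 0 with _ | c0 <;> rcases PySem.Str.pyGet? p 1 with _ | c1
  · rfl
  · cases h2 : PySem.Int.ofChars? [c1] <;> simp [h2]
  · rfl
  · cases h2 : PySem.Int.ofChars? [c1] <;> simp [h2]

-- ---------- walk lemmas ----------

lemma wlk_board {s x : Int × Int} {k : Nat} (h : wlk s (k + 1) x) : boardCell x := by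
  rcases h with ⟨y, _, hy⟩
  exact jm_board hy

lemma JW_zero {red green : Int × Int} {q : JPair} :
    JW red green 0 q ↔ q = (red, green) := by
  unfold JW wlk
  constructor
  · rintro ⟨h1, h2⟩
    exact Prod.ext h1 h2
  · rintro rfl
    exact ⟨rfl, rfl⟩

lemma exists_sphere_le {red green : Int × Int} {j : Nat} {q : JPair}
    (h : JW red green j q) : ∃ d ≤ j, sphereP red green d q := by
  induction j using Nat.strong_induction_on with
  | _ j ih =>
    by_cases hmin : ∀ i < j, ¬ JW red green i q
    · exact ⟨j, le_refl _, h, hmin⟩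
    · push_neg at hmin
      obtain ⟨i, hij, hJW⟩ := hmin
      obtain ⟨d, hd, hs⟩ := ih i hij hJW
      exact ⟨d, by omega, hs⟩

lemma sphere_succ_pred {red green : Int × Int} {k : Nat} {q : JPair}
    (h : sphereP red green (k + 1) q) : ∃ p, sphereP red green k p ∧ jsucc p q := by
  obtain ⟨⟨hw1, hw2⟩, hmin⟩ := h
  obtain ⟨y, hy, h1⟩ := wlk_succ.1 hw1
  obtain ⟨z, hz, h2⟩ := wlk_succ.1 hw2
  obtain ⟨d, hdk, hsp⟩ := exists_sphere_le (q := ((y, z) : JPair)) ⟨hy, hz⟩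
  rcases Nat.lt_or_ge d k with hdlt | hdge
  · exact absurd (show JW red green (d + 1) q from
      ⟨wlk_succ.2 ⟨y, hsp.1.1, h1⟩, wlk_succ.2 ⟨z, hsp.1.2, h2⟩⟩)
      (hmin (d + 1) (by omega))
  · have hdk' : d = k := by omega
    subst hdk'
    exact ⟨(y, z), hsp, h1, h2⟩

lemma sphere_empty_mono {red green : Int × Int} {l : Nat}
    (h : ∀ q, ¬ sphereP red green l q) :
    ∀ d, l ≤ d → ∀ q, ¬ sphereP red green d q := by
  intro d hd
  induction d, hd using Nat.le_induction with
  | base => exact h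
  | succ d hd ih =>
    intro q hs
    obtain ⟨p, hp, -⟩ := sphere_succ_pred hs
    exact ih p hp

-- no meet ever, from any level where the frontier (exact-distance sphere) is empty
lemma no_meet_of_sphere_empty {red green : Int × Int} (hne : red ≠ green) {l : Nat}
    (hempty : ∀ q, ¬ sphereP red green l q)
    (hNoMeet : ∀ m, 1 ≤ m → m ≤ l → ¬ MeetAt red green m) :
    ∀ m, 1 ≤ m → ¬ MeetAt red green m := by
  rintro m hm1 ⟨s, hr, hg⟩
  obtain ⟨d, hdm, hsp⟩ := exists_sphere_le (q := ((s, s) : JPair)) ⟨hr, hg⟩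
  rcases Nat.lt_or_ge d l with hdl | hge
  · have hd1 : 1 ≤ d := by
      rcases Nat.eq_zero_or_pos d with rfl | h
      · have heq := JW_zero.1 hsp.1
        have h1 : s = red := congrArg Prod.fst heq
        have h2 : s = green := congrArg Prod.snd heq
        exact absurd (h1.symm.trans h2) hne
      · exact h
    exact hNoMeet d hd1 (le_of_lt hdl) ⟨s, hsp.1.1, hsp.1.2⟩
  · exact sphere_empty_mono hempty d hge (s, s) hsp

-- ---------- the joint level-synchronous BFS computes `ans` ----------

lemma loopB_sim (red green : Int × Int) (hne : red ≠ green) :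
    ∀ (fb : Nat) (l : Nat) (F S : List JPair),
    (∀ q, q ∈ F ↔ sphereP red green l q) →
    (∀ q, q ∈ S ↔ ballP red green l q) →
    F.Nodup → S.Nodup →
    (∀ m, 1 ≤ m → m ≤ l → ¬ MeetAt red green m) →
    4097 - S.length + 2 ≤ fb →
    loopB fb (l : Int) F S = ans red green := by
  intro fb
  induction fb with
  | zero =>
    intro l F S hF hS hFnd hSnd hNM hfb
    omega
  | succ fb ih =>
    intro l F S hF hS hFnd hSnd hNM hfb
    have hballuniv : ∀ x ∈ S, x = ((red, green) : JPair) ∨ boardP x := by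
      intro x hx
      obtain ⟨j, hjl, hJ⟩ := (hS x).1 hx
      cases j with
      | zero => exact Or.inl (JW_zero.1 hJ)
      | succ j => exact Or.inr ⟨wlk_board hJ.1, wlk_board hJ.2⟩
    have hSlen : S.length ≤ 4097 := by
      have := nodup_length_le hSnd (fun x hx => mem_univL (hballuniv x hx))
      rwa [length_univL] at this
    cases F with
    | nil =>
      rw [loopB_nil]
      have hempty : ∀ q, ¬ sphereP red green l q := fun q hq => by
        simpa using (hF q).2 hq
      rw [ans_none (no_meet_of_sphere_empty hne hempty hNM)]
    | cons f0 F2 =>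
      by_cases hmeet : ((genB (f0 :: F2)).any (fun p => p.1 == p.2)) = true
      · rw [loopB]
        simp only []
        rw [if_pos hmeet]
        obtain ⟨p, hpF, hpm⟩ := anyMeet.1 hmeet
        have hsp := (hF p).1 hpF
        obtain ⟨c, h1, h2⟩ := hpm
        have hM : MeetAt red green (l + 1) :=
          ⟨c, wlk_succ.2 ⟨p.1, hsp.1.1, h1⟩, wlk_succ.2 ⟨p.2, hsp.1.2, h2⟩⟩
        rw [ans_first (by omega) hM (fun j hj1 hjl => hNM j hj1 (by omega))]
        push_cast
        ring
      · have hNM' : ∀ m, 1 ≤ m → m ≤ l + 1 → ¬ MeetAt red green m := by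
          intro m hm1 hml hMe
          rcases Nat.lt_or_ge m (l + 1) with hlt | hge
          · exact hNM m hm1 (by omega) hMe
          · have hmeq : m = l + 1 := by omega
            subst hmeq
            obtain ⟨s, hr, hg⟩ := hMe
            obtain ⟨y, hy, h1⟩ := wlk_succ.1 hr
            obtain ⟨z, hz, h2⟩ := wlk_succ.1 hg
            obtain ⟨d, hdl, hspd⟩ := exists_sphere_le (q := ((y, z) : JPair)) ⟨hy, hz⟩
            rcases Nat.lt_or_ge d l with hd | hd
            · exact hNM (d + 1) (by omega) (by omega)
                ⟨s, wlk_succ.2 ⟨y, hspd.1.1, h1⟩, wlk_succ.2 ⟨z, hspd.1.2, h2⟩⟩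
            · have hdeq : d = l := by omega
              subst hdeq
              exact hmeet (anyMeet.2 ⟨(y, z), (hF _).2 hspd, s, h1, h2⟩)
        rw [loopB]
        simp only []
        rw [if_neg hmeet]
        set gen : PySem.Set JPair := genB (f0 :: F2) with hgdef
        set fr' : PySem.Set JPair := PySem.Set.diff gen S with hfdef
        set S' : PySem.Set JPair := PySem.Set.union S fr' with hsdef
        have hfr : ∀ q, q ∈ fr' ↔ sphereP red green (l + 1) q := by
          intro q
          rw [hfdef, PySem.Set.mem_diff, hgdef, mem_genB]
          constructor
          · rintro ⟨⟨p, hpF, hj⟩, hnS⟩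
            have hsp := (hF p).1 hpF
            refine ⟨⟨wlk_succ.2 ⟨p.1, hsp.1.1, hj.1⟩, wlk_succ.2 ⟨p.2, hsp.1.2, hj.2⟩⟩, ?_⟩
            intro j hjl hJ
            exact hnS ((hS q).2 ⟨j, by omega, hJ⟩)
          · rintro hsq
            obtain ⟨p, hp, hj⟩ := sphere_succ_pred hsq
            refine ⟨⟨p, (hF p).2 hp, hj⟩, fun hqS => ?_⟩
            obtain ⟨j, hjl, hJ⟩ := (hS q).1 hqS
            exact hsq.2 j (by omega) hJ
        have hS' : ∀ q, q ∈ S' ↔ ballP red green (l + 1) q := by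
          intro q
          rw [hsdef, PySem.Set.mem_union]
          constructor
          · rintro (hq | hq)
            · obtain ⟨j, hjl, hJ⟩ := (hS q).1 hq
              exact ⟨j, by omega, hJ⟩
            · exact ⟨l + 1, le_refl _, ((hfr q).1 hq).1⟩
          · rintro ⟨j, hjl, hJ⟩
            rcases Nat.lt_or_ge j (l + 1) with hlt | hge
            · exact Or.inl ((hS q).2 ⟨j, by omega, hJ⟩)
            · obtain ⟨d, hdj, hspd⟩ := exists_sphere_le hJ
              rcases Nat.lt_or_ge d (l + 1) with hd | hd
              · exact Or.inl ((hS q).2 ⟨d, by omega, hspd.1⟩)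
              · have hdeq : d = l + 1 := by omega
                subst hdeq
                exact Or.inr ((hfr q).2 hspd)
        have hfrnd : fr'.Nodup := PySem.Set.nodup_diff _ _ (nodup_genB _)
        have hS'nd : S'.Nodup := PySem.Set.nodup_union _ _ hSnd
        by_cases hfre : fr' = []
        · rw [hfre, loopB_nil]
          have hempty : ∀ q, ¬ sphereP red green (l + 1) q := fun q hq => by
            have := (hfr q).2 hq
            rw [hfre] at this
            exact absurd this List.not_mem_nil
          rw [ans_none (no_meet_of_sphere_empty hne hempty hNM')]
        · have hS'len : S'.length = S.length + fr'.length := by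
            have hdisj : (S ++ fr').Nodup := by
              rw [List.nodup_append]
              refine ⟨hSnd, hfrnd, fun x hx y hy hxy => ?_⟩
              subst hxy
              rw [hfdef, PySem.Set.mem_diff] at hy
              exact hy.2 hx
            have := nodup_same_length hS'nd hdisj (by
              intro x
              rw [hsdef, PySem.Set.mem_union, List.mem_append])
            rw [this, List.length_append]
          have hfrlen : 1 ≤ fr'.length := List.length_pos_iff.2 hfre
          have hS'97 : S'.length ≤ 4097 := by
            have hb' : ∀ x ∈ S', x = ((red, green) : JPair) ∨ boardP x := by
              intro x hx
              obtain ⟨j, hjl, hJ⟩ := (hS' x).1 hx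
              cases j with
              | zero => exact Or.inl (JW_zero.1 hJ)
              | succ j => exact Or.inr ⟨wlk_board hJ.1, wlk_board hJ.2⟩
            have := nodup_length_le hS'nd (fun x hx => mem_univL (hb' x hx))
            rwa [length_univL] at this
          have hcast : (l : Int) + 1 = ((l + 1 : Nat) : Int) := by push_cast; ring
          rw [hcast]
          exact ih (l + 1) fr' S' hfr hS' hfrnd hS'nd hNM' (by omega)

lemma loopB_eq_ans (red green : Int × Int) (hne : red ≠ green) :
    loopB 5000 0 (PySem.Set.ofList [((red, green) : JPair)])
      (PySem.Set.ofList [((red, green) : JPair)]) = ans red green := by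
  have hs0 : PySem.Set.ofList [((red, green) : JPair)] = [((red, green) : JPair)] :=
    PySem.Set.ofList_eq_self_of_nodup _ (List.nodup_singleton _)
  rw [hs0]
  have h0 : ∀ q : JPair, q ∈ [((red, green) : JPair)] ↔ sphereP red green 0 q := by
    intro q
    simp only [List.mem_cons, List.not_mem_nil, or_false]
    constructor
    · rintro rfl
      exact ⟨JW_zero.2 rfl, fun j hj => absurd hj (Nat.not_lt_zero _)⟩
    · rintro ⟨hJ, -⟩
      exact JW_zero.1 hJ
  have hb0 : ∀ q : JPair, q ∈ [((red, green) : JPair)] ↔ ballP red green 0 q := by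
    intro q
    simp only [List.mem_cons, List.not_mem_nil, or_false]
    constructor
    · rintro rfl
      exact ⟨0, le_refl _, JW_zero.2 rfl⟩
    · rintro ⟨j, hj, hJ⟩
      have : j = 0 := Nat.le_zero.1 hj
      subst this
      exact JW_zero.1 hJ
  have := loopB_sim red green hne 5000 0 [((red, green) : JPair)] [((red, green) : JPair)]
    h0 hb0 (List.nodup_singleton _) (List.nodup_singleton _)
    (fun m h1 h2 => absurd (le_trans h1 h2) (by omega)) (by simp)
  simpa using this

-- ---------- B's loop computes `ans` ----------

lemma period_step {s : Int × Int} {t : Nat}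
    (h : ∀ x, wlk s (t + 2) x ↔ wlk s t x) :
    ∀ j, t ≤ j → ∀ x, (wlk s (j + 2) x ↔ wlk s j x) := by
  intro j hj
  induction j, hj using Nat.le_induction with
  | base => exact h
  | succ j hj ih =>
    intro x
    constructor
    · rintro ⟨y, hy, hxy⟩
      exact ⟨y, (ih y).1 hy, hxy⟩
    · rintro ⟨y, hy, hxy⟩
      exact ⟨y, (ih y).2 hy, hxy⟩

lemma no_meet_of_period {red green : Int × Int} {t : Nat}
    (hr : ∀ x, wlk red (t + 2) x ↔ wlk red t x)
    (hg : ∀ x, wlk green (t + 2) x ↔ wlk green t x)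
    (hNoMeet : ∀ m, 1 ≤ m → m ≤ t + 2 → ¬ MeetAt red green m) :
    ∀ m, 1 ≤ m → ¬ MeetAt red green m := by
  intro m
  induction m using Nat.strong_induction_on with
  | _ m ih =>
    intro hm1 hmeet
    rcases Nat.lt_or_ge m (t + 3) with hlt | hge
    · exact hNoMeet m hm1 (by omega) hmeet
    · obtain ⟨s, hr2, hg2⟩ := hmeet
      have hm2 : m - 2 + 2 = m := by omega
      have hr' : wlk red (m - 2) s :=
        (period_step hr (m - 2) (by omega) s).1 (by rw [hm2]; exact hr2)
      have hg' : wlk green (m - 2) s :=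
        (period_step hg (m - 2) (by omega) s).1 (by rw [hm2]; exact hg2)
      exact ih (m - 2) (by omega) (by omega) ⟨s, hr', hg'⟩

lemma len_le_64 {S : List (Int × Int)} (hnd : S.Nodup) (hb : ∀ x ∈ S, boardCell x) :
    S.length ≤ 64 := by
  have h := nodup_length_le hnd (fun x hx => mem_allCells (hb x hx))
  have h64 : allCells.length = 64 := by decide
  omega

lemma inter_ne_iff {a b : PySem.Set (Int × Int)} :
    PySem.Set.inter a b ≠ [] ↔ ∃ s, s ∈ a ∧ s ∈ b := by
  constructor
  · intro h
    obtain ⟨s, hs⟩ := List.exists_mem_of_ne_nil _ h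
    rw [PySem.Set.mem_inter _ _ _] at hs
    exact ⟨s, hs⟩
  · rintro ⟨s, h1, h2⟩
    exact List.ne_nil_of_mem ((PySem.Set.mem_inter _ _ _).2 ⟨h1, h2⟩)

lemma singleton_walk (s : Int × Int) :
    ∀ x, x ∈ ([s] : List (Int × Int)) ↔ wlk s 0 x := by
  intro x
  rw [wlk_zero]
  simp

lemma step_walk {s : Int × Int} {k : Nat} {S : PySem.Set (Int × Int)}
    (hS : ∀ x, x ∈ S ↔ wlk s k x) : ∀ x, x ∈ stepB S ↔ wlk s (k + 1) x := by
  intro x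
  rw [mem_stepB]
  constructor
  · rintro ⟨c, hc, hx⟩
    exact wlk_succ.2 ⟨c, (hS c).1 hc, hx⟩
  · intro hx
    obtain ⟨y, hy, hxy⟩ := wlk_succ.1 hx
    exact ⟨y, (hS y).2 hy, hxy⟩

lemma loopAlt_sim (red green : Int × Int) (_hne : red ≠ green) :
    ∀ (fb : Nat) (l : Nat) (R G P Q : PySem.Set (Int × Int)),
    (∀ x, x ∈ R ↔ wlk red (l + 2) x) → (∀ x, x ∈ G ↔ wlk green (l + 2) x) →
    (∀ x, x ∈ P ↔ wlk red (l + 1) x) → (∀ x, x ∈ Q ↔ wlk green (l + 1) x) →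
    R.Nodup → G.Nodup → P.Nodup → Q.Nodup →
    (∀ m, 1 ≤ m → m ≤ l + 2 → ¬ MeetAt red green m) →
    258 - (R.length + G.length + P.length + Q.length) ≤ fb →
    loopAlt fb ((l : Int) + 2) (R, G) (some (P, Q)) = ans red green := by
  intro fb
  induction fb with
  | zero =>
    intro l R G P Q hR hG hP hQ hRnd hGnd hPnd hQnd hNM hfb
    have h1 : R.length ≤ 64 := len_le_64 hRnd (fun x hx => wlk_board ((hR x).1 hx))
    have h2 : G.length ≤ 64 := len_le_64 hGnd (fun x hx => wlk_board ((hG x).1 hx))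
    have h3 : P.length ≤ 64 := len_le_64 hPnd (fun x hx => wlk_board ((hP x).1 hx))
    have h4 : Q.length ≤ 64 := len_le_64 hQnd (fun x hx => wlk_board ((hQ x).1 hx))
    omega
  | succ fb ih =>
    intro l R G P Q hR hG hP hQ hRnd hGnd hPnd hQnd hNM hfb
    have hnr : ∀ x, x ∈ stepB R ↔ wlk red (l + 3) x := step_walk hR
    have hng : ∀ x, x ∈ stepB G ↔ wlk green (l + 3) x := step_walk hG
    rw [loopAlt]
    simp only []
    by_cases hint : PySem.Set.inter (stepB R) (stepB G) ≠ []
    · rw [if_pos hint]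
      obtain ⟨s, hsa, hsb⟩ := inter_ne_iff.1 hint
      have hM : MeetAt red green (l + 3) := ⟨s, (hnr s).1 hsa, (hng s).1 hsb⟩
      rw [ans_first (by omega) hM (fun j hj1 hjl => hNM j hj1 (by omega))]
      push_cast
      ring
    · rw [if_neg hint]
      have hNM3 : ∀ m, 1 ≤ m → m ≤ l + 3 → ¬ MeetAt red green m := by
        intro m hm1 hml hMe
        rcases Nat.lt_or_ge m (l + 3) with hlt | hge
        · exact hNM m hm1 (by omega) hMe
        · have hmeq : m = l + 3 := by omega
          subst hmeq
          obtain ⟨s, h1, h2⟩ := hMe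
          exact hint (inter_ne_iff.2 ⟨s, (hnr s).2 h1, (hng s).2 h2⟩)
      by_cases hstab : (PySem.Set.equal (stepB R) P && PySem.Set.equal (stepB G) Q) = true
      · rw [if_pos hstab]
        rw [Bool.and_eq_true] at hstab
        have her : ∀ x, wlk red (l + 1 + 2) x ↔ wlk red (l + 1) x := fun x =>
          (hnr x).symm.trans (((PySem.Set.equal_iff _ _).1 hstab.1 x).trans (hP x))
        have heg : ∀ x, wlk green (l + 1 + 2) x ↔ wlk green (l + 1) x := fun x =>
          (hng x).symm.trans (((PySem.Set.equal_iff _ _).1 hstab.2 x).trans (hQ x))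
        rw [ans_none (no_meet_of_period her heg (fun m h1 h2 => hNM3 m h1 (by omega)))]
      · rw [if_neg hstab]
        have hPsub : ∀ x ∈ P, x ∈ stepB R := by
          intro x hx
          have hw : wlk red (l + 1) x := (hP x).1 hx
          have hb : boardCell x := wlk_board hw
          obtain ⟨y, hy⟩ := board_has_nbr hb
          exact (hnr x).2 (wlk_succ.2 ⟨y, wlk_succ.2 ⟨x, hw, hy⟩, jm_symm hb hy⟩)
        have hQsub : ∀ x ∈ Q, x ∈ stepB G := by
          intro x hx
          have hw : wlk green (l + 1) x := (hQ x).1 hx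
          have hb : boardCell x := wlk_board hw
          obtain ⟨y, hy⟩ := board_has_nbr hb
          exact (hng x).2 (wlk_succ.2 ⟨y, wlk_succ.2 ⟨x, hw, hy⟩, jm_symm hb hy⟩)
        have hgrow : P.length + Q.length + 1 ≤ (stepB R).length + (stepB G).length := by
          have hPle : P.length ≤ (stepB R).length := nodup_length_le hPnd hPsub
          have hQle : Q.length ≤ (stepB G).length := nodup_length_le hQnd hQsub
          by_cases h1 : PySem.Set.equal (stepB R) P = true
          · have h2 : ¬ PySem.Set.equal (stepB G) Q = true := fun h2 => by
              rw [Bool.and_eq_true] at hstab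
              exact hstab ⟨h1, h2⟩
            have hx : ∃ x, x ∈ stepB G ∧ x ∉ Q := by
              by_contra hno
              push_neg at hno
              apply h2
              rw [PySem.Set.equal_iff]
              exact fun x => ⟨hno x, hQsub x⟩
            obtain ⟨x, hx1, hx2⟩ := hx
            have := nodup_length_lt hQnd (nodup_stepB G) hQsub hx1 hx2
            omega
          · have hx : ∃ x, x ∈ stepB R ∧ x ∉ P := by
              by_contra hno
              push_neg at hno
              apply h1
              rw [PySem.Set.equal_iff]
              exact fun x => ⟨hno x, hPsub x⟩
            obtain ⟨x, hx1, hx2⟩ := hx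
            have := nodup_length_lt hPnd (nodup_stepB R) hPsub hx1 hx2
            omega
        have hcast : (l : Int) + 2 + 1 = ((l + 1 : Nat) : Int) + 2 := by push_cast; ring
        rw [hcast]
        exact ih (l + 1) (stepB R) (stepB G) R G hnr hng hR hG
          (nodup_stepB R) (nodup_stepB G) hRnd hGnd hNM3 (by omega)

lemma loopAlt_eq_ans (red green : Int × Int) (hne : red ≠ green) :
    loopAlt 600 0 (PySem.Set.ofList [red], PySem.Set.ofList [green]) none = ans red green := by
  have hr0 : PySem.Set.ofList [red] = [red] :=
    PySem.Set.ofList_eq_self_of_nodup _ (List.nodup_singleton _)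
  have hg0 : PySem.Set.ofList [green] = [green] :=
    PySem.Set.ofList_eq_self_of_nodup _ (List.nodup_singleton _)
  rw [hr0, hg0]
  have hw1r : ∀ x, x ∈ stepB [red] ↔ wlk red 1 x := step_walk (singleton_walk red)
  have hw1g : ∀ x, x ∈ stepB [green] ↔ wlk green 1 x := step_walk (singleton_walk green)
  have hw2r : ∀ x, x ∈ stepB (stepB [red]) ↔ wlk red 2 x := step_walk hw1r
  have hw2g : ∀ x, x ∈ stepB (stepB [green]) ↔ wlk green 2 x := step_walk hw1g
  rw [show (600 : Nat) = 599 + 1 from rfl, loopAlt]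
  simp only []
  by_cases hint1 : PySem.Set.inter (stepB [red]) (stepB [green]) ≠ []
  · rw [if_pos hint1]
    obtain ⟨s, h1, h2⟩ := inter_ne_iff.1 hint1
    have hM : MeetAt red green 1 := ⟨s, (hw1r s).1 h1, (hw1g s).1 h2⟩
    rw [ans_first (le_refl 1) hM (fun j hj1 hjl => absurd hj1 (by omega))]
    norm_num
  · rw [if_neg hint1]
    have hNM1 : ∀ m, 1 ≤ m → m ≤ 1 → ¬ MeetAt red green m := by
      intro m h1 h2 hMe
      have hm : m = 1 := by omega
      subst hm
      obtain ⟨s, hrr, hgg⟩ := hMe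
      exact hint1 (inter_ne_iff.2 ⟨s, (hw1r s).2 hrr, (hw1g s).2 hgg⟩)
    rw [show (599 : Nat) = 598 + 1 from rfl, loopAlt]
    simp only []
    by_cases hint2 : PySem.Set.inter (stepB (stepB [red])) (stepB (stepB [green])) ≠ []
    · rw [if_pos hint2]
      obtain ⟨s, h1, h2⟩ := inter_ne_iff.1 hint2
      have hM : MeetAt red green 2 := ⟨s, (hw2r s).1 h1, (hw2g s).1 h2⟩
      rw [ans_first (by omega) hM (fun j hj1 hjl => hNM1 j hj1 (by omega))]
      norm_num
    · rw [if_neg hint2]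
      have hNM2 : ∀ m, 1 ≤ m → m ≤ 2 → ¬ MeetAt red green m := by
        intro m h1 h2 hMe
        rcases Nat.lt_or_ge m 2 with hlt | hge
        · exact hNM1 m h1 (by omega) hMe
        · have hm : m = 2 := by omega
          subst hm
          obtain ⟨s, hrr, hgg⟩ := hMe
          exact hint2 (inter_ne_iff.2 ⟨s, (hw2r s).2 hrr, (hw2g s).2 hgg⟩)
      by_cases hstab : (PySem.Set.equal (stepB (stepB [red])) [red] &&
          PySem.Set.equal (stepB (stepB [green])) [green]) = true
      · rw [if_pos hstab]
        rw [Bool.and_eq_true] at hstab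
        have her : ∀ x, wlk red (0 + 2) x ↔ wlk red 0 x := fun x =>
          (hw2r x).symm.trans (((PySem.Set.equal_iff _ _).1 hstab.1 x).trans (singleton_walk red x))
        have heg : ∀ x, wlk green (0 + 2) x ↔ wlk green 0 x := fun x =>
          (hw2g x).symm.trans (((PySem.Set.equal_iff _ _).1 hstab.2 x).trans (singleton_walk green x))
        rw [ans_none (no_meet_of_period her heg (fun m h1 h2 => hNM2 m h1 (by omega)))]
      · rw [if_neg hstab]
        have hcast : (0 : Int) + 1 + 1 = ((0 : Nat) : Int) + 2 := by norm_num
        rw [hcast]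
        exact loopAlt_sim red green hne 598 0 _ _ _ _ hw2r hw2g hw1r hw1g
          (nodup_stepB _) (nodup_stepB _) (nodup_stepB _) (nodup_stepB _) hNM2 (by omega)

-- ===== VERDICT (by name: the statement is the Claim_ definition above) =====
theorem min_meeting_moves_spec : Claim_equal_min_meeting_moves := by
  intro red_pos green_pos _ _
  show min_meeting_moves red_pos green_pos = min_meeting_moves_alt red_pos green_pos
  unfold min_meeting_moves min_meeting_moves_alt
  rw [parseB_eq red_pos, parseB_eq green_pos]
  cases hr : chess_to_coord red_pos <;> cases hg : chess_to_coord green_pos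
  · rfl
  · rfl
  · rfl
  case some.some rs gs =>
    simp only []
    by_cases heq : rs = gs
    · rw [if_pos heq, if_pos heq]
    · rw [if_neg heq, if_neg heq]
      rw [core_eq rs gs heq, loopB_eq_ans rs gs heq, loopAlt_eq_ans rs gs heq]
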